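-- pv_equiv track=rewrite | github.com/haolunc/ARC-RL | reference_solutions/solutions/be94b721.py | transform
-- ===== SOURCE A (Python) =====
-- def transform(grid):
--
--     counts = {}
--     for row in grid:
--         for v in row:
--             if v != 0:
--                 counts[v] = counts.get(v, 0) + 1
--
--     if not counts:
--
--         return []
--
--     target = max(sorted(counts.keys()), key=lambda col: counts[col])
--
--     r_min, r_max = len(grid), -1
--     c_min, c_max = len(grid[0]), -1
--     for r, row in enumerate(grid):
--         for c, v in enumerate(row):
--             if v == target:
--                 if r < r_min:
--                     r_min = r
--                 if r > r_max:
--                     r_max = r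
--                 if c < c_min:
--                     c_min = c
--                 if c > c_max:
--                     c_max = c
--
--     out = []
--     for r in range(r_min, r_max + 1):
--         out.append(grid[r][c_min:c_max + 1])
--
--     return out
-- ===== SOURCE B (Python) =====
-- def transform(grid):
--     # One pass: per-color aggregate [count, rmin, rmax, cmin, cmax] built while scanning,
--     # so no second bounding-box scan of the grid is needed.
--     stats = {}
--     for r, row in enumerate(grid):
--         for c, v in enumerate(row):
--             if v != 0:
--                 s = stats.get(v)
--                 if s is None:
--                     stats[v] = [1, r, r, c, c]
--                 else:
--                     s[0] += 1
--                     s[1] = min(s[1], r)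
--                     s[2] = max(s[2], r)
--                     s[3] = min(s[3], c)
--                     s[4] = max(s[4], c)
--     if not stats:
--         return []
--     target = min(stats, key=lambda k: (-stats[k][0], k))
--     _, r0, r1, c0, c1 = stats[target]
--     return [row[c0:c1 + 1] for row in grid[r0:r1 + 1]]
-- ===== Notes on version B (the rewrite author's own statement) =====
-- stated objective: alternative
-- what changed: B makes a SINGLE pass over the grid building a per-color aggregate dict color -> [count, rmin, rmax, cmin, cmax], then picks the best color and reads its bounding box straight out of the dict, so A's separate second bounding-box scan of the whole grid disappears; Pre_ excludes ragged grids whose first row is not a longest row, where A's c_min initializer len(grid[0]) can mask columns beyond the first row's width.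
-- outside the precondition, e.g. on transform([[0], [0, 0, 5]]): A returns [[0, 5]], B returns [[5]]
import Mathlib
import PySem

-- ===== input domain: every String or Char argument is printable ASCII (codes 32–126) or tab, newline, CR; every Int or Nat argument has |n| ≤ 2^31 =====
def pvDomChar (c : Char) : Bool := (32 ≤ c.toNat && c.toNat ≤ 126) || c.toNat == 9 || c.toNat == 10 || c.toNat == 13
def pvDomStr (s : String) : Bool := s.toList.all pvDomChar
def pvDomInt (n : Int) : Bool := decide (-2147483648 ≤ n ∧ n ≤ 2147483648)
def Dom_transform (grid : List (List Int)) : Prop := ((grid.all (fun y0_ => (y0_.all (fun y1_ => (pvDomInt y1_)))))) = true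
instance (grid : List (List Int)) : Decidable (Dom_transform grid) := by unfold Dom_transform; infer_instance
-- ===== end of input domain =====

-- B replaces A's two full grid scans (count pass, then a separate bounding-box pass) by ONE pass
-- that aggregates per color a record [count, rmin, rmax, cmin, cmax] in a dict, then picks the
-- best color and reads its box out of the dict (objective: alternative).

-- ===== PORT A =====
-- the nested counting loop over the grid (counts[v] = counts.get(v, 0) + 1 for nonzero v)
def aCounts (grid : List (List Int)) : PySem.Dict Int Int :=
  grid.foldl (fun d row =>
    row.foldl (fun d v => if v ≠ 0 then d.insert v (d.getD v 0 + 1) else d) d)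
    PySem.Dict.empty

-- the running-extremes loop: (r_min, r_max, c_min, c_max) over all cells equal to target
def aBox (grid : List (List Int)) (target : Int) : Int × Int × Int × Int :=
  (PySem.List.enumerate grid 0).foldl (fun st p =>
    (PySem.List.enumerate p.2 0).foldl (fun st q =>
      if q.2 = target then
        let rmin := if p.1 < st.1 then p.1 else st.1
        let rmax := if p.1 > st.2.1 then p.1 else st.2.1
        let cmin := if q.1 < st.2.2.1 then q.1 else st.2.2.1
        let cmax := if q.1 > st.2.2.2 then q.1 else st.2.2.2
        (rmin, rmax, cmin, cmax)
      else st) st)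
    (PySem.List.len grid, -1, PySem.List.len (PySem.List.pyGetD grid 0 []), -1)

-- the output loop: out.append(grid[r][c_min:c_max+1]) for r in range(r_min, r_max+1)
def aTail (grid : List (List Int)) (target : Int) : List (List Int) :=
  let st := aBox grid target
  (PySem.List.pyRange st.1 (st.2.1 + 1)).foldl (fun out r =>
    out ++ [PySem.List.slice (PySem.List.pyGetD grid r []) (some st.2.2.1) (some (st.2.2.2 + 1))]) []

def transform (grid : List (List Int)) : List (List Int) :=
  let counts := aCounts grid
  if counts.items = [] then []
  else
    match PySem.List.max? (PySem.List.sorted counts.keys (fun k => k) false)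
            (fun col => counts.getD col 0) with
    | none => []   -- unreachable (counts is nonempty); Python's max cannot raise here
    | some target => aTail grid target

-- ===== PORT B =====
-- the in-place update of the per-color aggregate [count, rmin, rmax, cmin, cmax]
def bUpd (s : Int × Int × Int × Int × Int) (r c : Int) : Int × Int × Int × Int × Int :=
  (s.1 + 1, min s.2.1 r, max s.2.2.1 r, min s.2.2.2.1 c, max s.2.2.2.2 c)

-- the single pass: stats[v] = [count, rmin, rmax, cmin, cmax], new colors appended
def bStats (grid : List (List Int)) : PySem.Dict Int (Int × Int × Int × Int × Int) :=
  (PySem.List.enumerate grid 0).foldl (fun d p =>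
    (PySem.List.enumerate p.2 0).foldl
      (fun (d : PySem.Dict Int (Int × Int × Int × Int × Int)) (q : Int × Int) =>
      if q.2 ≠ 0 then
        match d.get? q.2 with
        | none => d.insert q.2 (1, p.1, p.1, q.1, q.1)
        | some s => d.insert q.2 (bUpd s p.1 q.1)
      else d) d) PySem.Dict.empty

def transform_alt (grid : List (List Int)) : List (List Int) :=
  let stats := bStats grid
  if stats.items = [] then []
  else
    match PySem.List.min2? stats.keys
            (fun k => -((stats.getD k (0, 0, 0, 0, 0)).1)) (fun k => k) with
    | none => []   -- unreachable (stats is nonempty); Python's min cannot raise here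
    | some target =>
      let s := stats.getD target (0, 0, 0, 0, 0)
      (PySem.List.slice grid (some s.2.1) (some (s.2.2.1 + 1))).map
        (fun row => PySem.List.slice row (some s.2.2.2.1) (some (s.2.2.2.2 + 1)))

-- ===== PRECONDITION & SPEC =====
-- Pre_ requires the first row to be a longest row (true of every rectangular grid, the natural
-- grid domain); on ragged grids with a longer later row A's c_min initializer len(grid[0]) can
-- mask columns beyond the first row's width, an accident of the sentinel initialization.
def Pre_transform (grid : List (List Int)) : Prop :=
  ∀ row ∈ grid, row.length ≤ (grid.headD []).length
instance (grid : List (List Int)) : Decidable (Pre_transform grid) := by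
  unfold Pre_transform; infer_instance

def pvWitness_transform : List (List Int) := [[1, 0], [0, 2], [2, 2]]

def Spec_transform (grid : List (List Int)) (out : List (List Int)) : Prop := out = transform_alt grid
instance (grid : List (List Int)) (out : List (List Int)) : Decidable (Spec_transform grid out) := by
  unfold Spec_transform; infer_instance

-- ===== CLAIM (what is proved, stated in full; the proofs are below) =====
def Claim_equal_transform : Prop :=
  ∀ (grid : List (List Int)), Dom_transform grid → Pre_transform grid → Spec_transform grid (transform grid)

-- ===== LEMMAS AND PROOFS =====

-- the flattened nonzero values, in row-major order
def bVals (grid : List (List Int)) : List Int :=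
  grid.flatMap (fun row => row.filter (fun v => v ≠ 0))

-- counts: the nested guarded loop equals the Counter of the flattened nonzero values
theorem pvFoldlIfFilter {α β : Type} (p : α → Prop) [DecidablePred p] (f : β → α → β) :
    ∀ (l : List α) (s : β),
      l.foldl (fun s x => if p x then f s x else s) s = (l.filter (fun x => decide (p x))).foldl f s := by
  intro l
  induction l with
  | nil => intro s; rfl
  | cons x xs ih =>
    intro s
    by_cases h : p x <;> simp [h, ih]

theorem aCounts_eq (grid : List (List Int)) : aCounts grid = PySem.Dict.counter (bVals grid) := by
  unfold aCounts bVals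
  rw [← List.foldl_flatten, pvFoldlIfFilter (fun v : Int => v ≠ 0),
    ← PySem.Dict.foldl_insert_getD_add_one_eq_counter]
  congr 1
  rw [List.flatMap_def, ← List.filter_flatten]

-- target: both selections return the unique best color
def pvBest (cnt : Int → Int) (xs : List Int) (m : Int) : Prop :=
  m ∈ xs ∧ ∀ y ∈ xs, y ≠ m → (cnt y < cnt m ∨ (cnt y = cnt m ∧ m < y))

def pvGA (cnt : Int → Int) (m x : Int) : Int := if cnt m < cnt x then x else m
def pvGB (cnt : Int → Int) (m x : Int) : Int :=
  if (decide (-cnt x < -cnt m) || !decide (-cnt m < -cnt x) && decide (x < m)) = true then x else m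

theorem max?_cons_fold (cnt : Int → Int) (x : Int) (t : List Int) :
    PySem.List.max? (x :: t) cnt = some (t.foldl (pvGA cnt) x) := by
  show List.foldl _ (some x) t = _
  induction t generalizing x with
  | nil => rfl
  | cons y ys ih =>
    show List.foldl _ (if cnt x < cnt y then some y else some x) ys = _
    rw [show (if cnt x < cnt y then some y else some x) = some (pvGA cnt x y) by
      unfold pvGA; split <;> rfl]
    exact ih (pvGA cnt x y)

theorem min2?_cons_fold (cnt : Int → Int) (x : Int) (t : List Int) :
    PySem.List.min2? (x :: t) (fun k => -cnt k) (fun k => k) = some (t.foldl (pvGB cnt) x) := by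
  show List.foldl _ (some x) t = _
  induction t generalizing x with
  | nil => rfl
  | cons y ys ih =>
    show List.foldl _ (if _ = true then some y else some x) ys = _
    rw [show (if (decide (-cnt y < -cnt x) || !decide (-cnt x < -cnt y) && decide (y < x)) = true
          then some y else some x) = some (pvGB cnt x y) by
      unfold pvGB; split <;> rfl]
    exact ih (pvGB cnt x y)

theorem pvBestA (cnt : Int → Int) :
    ∀ (t : List Int) (m : Int), (m :: t).Pairwise (· < ·) →
      pvBest cnt (m :: t) (t.foldl (pvGA cnt) m) := by
  intro t
  induction t with
  | nil =>
    intro m _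
    exact ⟨List.mem_singleton.2 rfl, by
      intro y hy hne; rw [List.mem_singleton.1 hy] at hne; exact absurd rfl hne⟩
  | cons x t' ih =>
    intro m hp
    have hpc := List.pairwise_cons.1 hp
    have hmx : m < x := hpc.1 x (List.mem_cons_self)
    have hmt : ∀ y ∈ t', m < y := fun y hy => hpc.1 y (List.mem_cons_of_mem _ hy)
    have hpc2 := List.pairwise_cons.1 hpc.2
    have hxt : ∀ y ∈ t', x < y := hpc2.1
    have hw : pvGA cnt m x = m ∨ pvGA cnt m x = x := by unfold pvGA; split <;> simp
    have hp' : (pvGA cnt m x :: t').Pairwise (· < ·) := by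
      refine List.pairwise_cons.2 ⟨?_, hpc2.2⟩
      intro y hy
      rcases hw with h | h <;> rw [h]
      · exact hmt y hy
      · exact hxt y hy
    have hbest := ih (pvGA cnt m x) hp'
    rw [show List.foldl (pvGA cnt) m (x :: t') = List.foldl (pvGA cnt) (pvGA cnt m x) t' from rfl]
    set r := List.foldl (pvGA cnt) (pvGA cnt m x) t' with hr
    constructor
    · rcases List.mem_cons.1 hbest.1 with h | h
      · rcases hw with h' | h' <;> rw [h'] at h <;> simp [h]
      · exact List.mem_cons_of_mem _ (List.mem_cons_of_mem _ h)
    · intro y hy hyr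
      by_cases hmem : y ∈ pvGA cnt m x :: t'
      · exact hbest.2 y hmem hyr
      · -- y is the loser of the first comparison
        have hcase : (pvGA cnt m x = m ∧ y = x) ∨ (pvGA cnt m x = x ∧ y = m) := by
          rcases List.mem_cons.1 hy with h1 | hy2
          · rcases hw with h | h
            · exact absurd (show y ∈ pvGA cnt m x :: t' by rw [h, h1]; exact List.mem_cons_self) hmem
            · exact Or.inr ⟨h, h1⟩
          · rcases List.mem_cons.1 hy2 with h1 | hy3
            · rcases hw with h | h
              · exact Or.inl ⟨h, h1⟩
              · exact absurd (show y ∈ pvGA cnt m x :: t' by rw [h, h1]; exact List.mem_cons_self) hmem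
            · exact absurd (List.mem_cons_of_mem _ hy3) hmem
        have hedge : r = pvGA cnt m x ∨
            (cnt (pvGA cnt m x) < cnt r ∨ (cnt (pvGA cnt m x) = cnt r ∧ r < pvGA cnt m x)) := by
          by_cases h : pvGA cnt m x = r
          · exact Or.inl h.symm
          · exact Or.inr (hbest.2 _ List.mem_cons_self h)
        rcases hcase with ⟨hwin, hy'⟩ | ⟨hwin, hy'⟩ <;> rw [hy']
        · -- winner m, loser x : ¬ cnt m < cnt x
          have hnlt : ¬ cnt m < cnt x := by
            by_contra hc; unfold pvGA at hwin; rw [if_pos hc] at hwin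
            exact absurd hwin.symm (ne_of_lt hmx)
          rw [hwin] at hedge
          rcases hedge with h' | hedge
          · rw [h']; omega
          · omega
        · -- winner x, loser m : cnt m < cnt x
          have hlt2 : cnt m < cnt x := by
            by_contra hc; unfold pvGA at hwin; rw [if_neg hc] at hwin
            exact absurd hwin (ne_of_lt hmx)
          rw [hwin] at hedge
          rcases hedge with h' | hedge
          · rw [h']; omega
          · omega

theorem pvBestB (cnt : Int → Int) :
    ∀ (t : List Int) (m : Int), (m :: t).Nodup →
      pvBest cnt (m :: t) (t.foldl (pvGB cnt) m) := by
  intro t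
  induction t with
  | nil =>
    intro m _
    exact ⟨List.mem_singleton.2 rfl, by
      intro y hy hne; rw [List.mem_singleton.1 hy] at hne; exact absurd rfl hne⟩
  | cons x t' ih =>
    intro m hnd
    have hmx : m ≠ x := by simp at hnd; tauto
    have hmt : m ∉ t' := by simp at hnd; tauto
    have hxt : x ∉ t' := by simp at hnd; tauto
    have hnd' : t'.Nodup := by simp at hnd; tauto
    have hw : pvGB cnt m x = m ∨ pvGB cnt m x = x := by unfold pvGB; split <;> simp
    have hndw : (pvGB cnt m x :: t').Nodup := by
      refine List.nodup_cons.2 ⟨?_, hnd'⟩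
      rcases hw with h | h <;> rw [h] <;> assumption
    have hbest := ih (pvGB cnt m x) hndw
    rw [show List.foldl (pvGB cnt) m (x :: t') = List.foldl (pvGB cnt) (pvGB cnt m x) t' from rfl]
    set r := List.foldl (pvGB cnt) (pvGB cnt m x) t' with hr
    -- the winner strictly beats the loser
    have hcond : (decide (-cnt x < -cnt m) || !decide (-cnt m < -cnt x) && decide (x < m)) = true
        ↔ (cnt m < cnt x ∨ (cnt m ≤ cnt x ∧ x < m)) := by
      simp only [Bool.or_eq_true, Bool.and_eq_true, Bool.not_eq_eq_eq_not, Bool.not_true,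
        decide_eq_true_eq, decide_eq_false_iff_not]
      constructor
      · rintro (h | ⟨h1, h2⟩)
        · exact Or.inl (by omega)
        · exact Or.inr ⟨by omega, h2⟩
      · rintro (h | ⟨h1, h2⟩)
        · exact Or.inl (by omega)
        · rcases lt_or_ge (cnt m) (cnt x) with h3 | h3
          · exact Or.inl (by omega)
          · exact Or.inr ⟨by omega, h2⟩
    constructor
    · rcases List.mem_cons.1 hbest.1 with h | h
      · rcases hw with h' | h' <;> rw [h'] at h <;> simp [h]
      · exact List.mem_cons_of_mem _ (List.mem_cons_of_mem _ h)
    · intro y hy hyr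
      by_cases hmem : y ∈ pvGB cnt m x :: t'
      · exact hbest.2 y hmem hyr
      · have hcase : (pvGB cnt m x = m ∧ y = x) ∨ (pvGB cnt m x = x ∧ y = m) := by
          rcases List.mem_cons.1 hy with h1 | hy2
          · rcases hw with h | h
            · exact absurd (show y ∈ pvGB cnt m x :: t' by rw [h, h1]; exact List.mem_cons_self) hmem
            · exact Or.inr ⟨h, h1⟩
          · rcases List.mem_cons.1 hy2 with h1 | hy3
            · rcases hw with h | h
              · exact Or.inl ⟨h, h1⟩
              · exact absurd (show y ∈ pvGB cnt m x :: t' by rw [h, h1]; exact List.mem_cons_self) hmem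
            · exact absurd (List.mem_cons_of_mem _ hy3) hmem
        have hedge : r = pvGB cnt m x ∨
            (cnt (pvGB cnt m x) < cnt r ∨ (cnt (pvGB cnt m x) = cnt r ∧ r < pvGB cnt m x)) := by
          by_cases h : pvGB cnt m x = r
          · exact Or.inl h.symm
          · exact Or.inr (hbest.2 _ List.mem_cons_self h)
        rcases hcase with ⟨hwin, hy'⟩ | ⟨hwin, hy'⟩ <;> rw [hy']
        · -- winner m, loser x : condition false
          have hnc : ¬ (cnt m < cnt x ∨ (cnt m ≤ cnt x ∧ x < m)) := by
            intro hc
            unfold pvGB at hwin; rw [if_pos (hcond.2 hc)] at hwin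
            exact hmx hwin.symm
          have h1 : ¬ cnt m < cnt x := fun h => hnc (Or.inl h)
          have h2 : ¬ (cnt m ≤ cnt x ∧ x < m) := fun h => hnc (Or.inr h)
          rw [hwin] at hedge
          rcases lt_trichotomy (cnt x) (cnt m) with hcm | hcm | hcm
          · rcases hedge with h' | hedge
            · rw [h']; omega
            · omega
          · have hxm : ¬ x < m := fun hh => h2 ⟨by omega, hh⟩
            rcases hedge with h' | hedge
            · rw [h']; omega
            · omega
          · exact absurd hcm h1
        · -- winner x, loser m : condition true
          have hc : cnt m < cnt x ∨ (cnt m ≤ cnt x ∧ x < m) := by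
            by_contra hc
            unfold pvGB at hwin
            rw [if_neg (fun hb => hc (hcond.1 hb))] at hwin
            exact hmx hwin
          rw [hwin] at hedge
          rcases hedge with h' | hedge
          · rw [h']; omega
          · omega

theorem pvBest_unique {cnt : Int → Int} {xs : List Int} {m m' : Int}
    (h1 : pvBest cnt xs m) (h2 : pvBest cnt xs m') : m = m' := by
  by_contra hne
  have e1 := h1.2 m' h2.1 (fun h => hne h.symm)
  have e2 := h2.2 m h1.1 hne
  omega

theorem pvBest_congr {cnt : Int → Int} {xs ys : List Int} {m : Int}
    (hm : ∀ y, y ∈ xs ↔ y ∈ ys) (h : pvBest cnt xs m) : pvBest cnt ys m :=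
  ⟨(hm m).1 h.1, fun y hy => h.2 y ((hm y).2 hy)⟩

theorem pvBest_cnt_congr {cnt cnt' : Int → Int} {xs : List Int} {m : Int}
    (hc : ∀ y ∈ xs, cnt y = cnt' y) (h : pvBest cnt xs m) : pvBest cnt' xs m := by
  refine ⟨h.1, fun y hy hne => ?_⟩
  have := h.2 y hy hne
  rw [hc y hy, hc m h.1] at this
  exact this

-- A's sort-then-max selection equals the min-by-(-count, key) selection over the counter keys
theorem target_eq (vals : List Int) (hne : vals ≠ []) :
    PySem.List.max? (PySem.List.sorted (PySem.Dict.counter vals).keys (fun k => k) false)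
        (fun col => (PySem.Dict.counter vals).getD col 0)
      = PySem.List.min2? (PySem.Dict.counter vals).keys
          (fun k => -((PySem.Dict.counter vals).getD k 0)) (fun k => k) := by
  have hK : (PySem.Dict.counter vals).keys = PySem.Set.ofList vals := PySem.Dict.keys_counter vals
  have hKne : (PySem.Dict.counter vals).keys ≠ [] := by
    obtain ⟨v, vs, rfl⟩ := List.exists_cons_of_ne_nil hne
    rw [hK]
    intro h
    have hv := (PySem.Set.mem_ofList (v :: vs) v).2 List.mem_cons_self
    rw [h] at hv
    cases hv
  have hnd : (PySem.Dict.counter vals).keys.Nodup := PySem.Dict.nodup_keys_counter vals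
  have hpair : (PySem.List.sorted (PySem.Dict.counter vals).keys (fun k => k) false).Pairwise (· < ·) := by
    rw [hK]; exact PySem.List.sorted_ofList_pairwise_lt vals
  have hSne : PySem.List.sorted (PySem.Dict.counter vals).keys (fun k => k) false ≠ [] := by
    rw [Ne, PySem.List.sorted_eq_nil_iff]; exact hKne
  have hmemS : ∀ y, y ∈ PySem.List.sorted (PySem.Dict.counter vals).keys (fun k => k) false
      ↔ y ∈ (PySem.Dict.counter vals).keys := fun y =>
    PySem.List.mem_sorted (PySem.Dict.counter vals).keys (fun k => k) false y
  obtain ⟨x, t, hS⟩ := List.exists_cons_of_ne_nil hSne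
  obtain ⟨x', t', hK2⟩ := List.exists_cons_of_ne_nil hKne
  set cnt : Int → Int := fun k => (PySem.Dict.counter vals).getD k 0 with hcnt
  have bA := pvBestA cnt t x (hS ▸ hpair)
  have bB := pvBestB cnt t' x' (hK2 ▸ hnd)
  have bA' : pvBest cnt (x' :: t') (t.foldl (pvGA cnt) x) :=
    pvBest_congr (fun y => by rw [← hK2, ← hS]; exact hmemS y) bA
  rw [hS, hK2, max?_cons_fold cnt, min2?_cons_fold cnt]
  exact congrArg some (pvBest_unique bA' bB)

-- positions of the target color, and the bounding-box computation
def pvOccs (t : Int) (row : List Int) : List Int :=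
  (PySem.List.enumerate row 0).filterMap (fun q => if q.2 = t then some q.1 else none)

def pvP (t : Int) (grid : List (List Int)) : List (Int × Int) :=
  (PySem.List.enumerate grid 0).flatMap (fun p => (pvOccs t p.2).map (fun c => (p.1, c)))

def pvU (st : Int × Int × Int × Int) (rc : Int × Int) : Int × Int × Int × Int :=
  (if rc.1 < st.1 then rc.1 else st.1,
   if rc.1 > st.2.1 then rc.1 else st.2.1,
   if rc.2 < st.2.2.1 then rc.2 else st.2.2.1,
   if rc.2 > st.2.2.2 then rc.2 else st.2.2.2)

theorem pvFilterMapIf {α β : Type} (p : α → Prop) [DecidablePred p] (f : α → β) :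
    ∀ (l : List α),
      l.filterMap (fun x => if p x then some (f x) else none)
        = (l.filter (fun x => decide (p x))).map f := by
  intro l
  induction l with
  | nil => rfl
  | cons x xs ih => by_cases h : p x <;> simp [h, ih]

theorem pvFoldlUSplit :
    ∀ (P : List (Int × Int)) (a b c d : Int),
      P.foldl pvU (a, b, c, d)
        = ((P.map (·.1)).foldl min a, (P.map (·.1)).foldl max b,
           (P.map (·.2)).foldl min c, (P.map (·.2)).foldl max d) := by
  intro P
  induction P with
  | nil => intro a b c d; rfl
  | cons rc P ih =>
    intro a b c d
    simp only [List.foldl_cons, List.map_cons]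
    rw [show pvU (a, b, c, d) rc
        = (min a rc.1, max b rc.1, min c rc.2, max d rc.2) by
      unfold pvU
      refine Prod.ext ?_ (Prod.ext ?_ (Prod.ext ?_ ?_)) <;> simp <;> split <;> omega]
    exact ih _ _ _ _

theorem aBox_eq (grid : List (List Int)) (t : Int) :
    aBox grid t
      = (((pvP t grid).map (·.1)).foldl min (PySem.List.len grid),
         ((pvP t grid).map (·.1)).foldl max (-1),
         ((pvP t grid).map (·.2)).foldl min (PySem.List.len (PySem.List.pyGetD grid 0 [])),
         ((pvP t grid).map (·.2)).foldl max (-1)) := by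
  have h1 : aBox grid t = (PySem.List.enumerate grid 0).foldl
      (fun st p => (PySem.List.enumerate p.2 0).foldl
        (fun st q => if q.2 = t then pvU st (p.1, q.1) else st) st)
      (PySem.List.len grid, -1, PySem.List.len (PySem.List.pyGetD grid 0 []), -1) := rfl
  rw [h1]
  have h2 : ∀ (st : Int × Int × Int × Int) (p : Int × List Int),
      (PySem.List.enumerate p.2 0).foldl
          (fun st q => if q.2 = t then pvU st (p.1, q.1) else st) st
        = ((pvOccs t p.2).map (fun c => (p.1, c))).foldl pvU st := by
    intro st p
    rw [pvFoldlIfFilter (fun q : Int × Int => q.2 = t) (fun st q => pvU st (p.1, q.1)),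
        pvOccs, pvFilterMapIf (fun q : Int × Int => q.2 = t) (fun q : Int × Int => q.1),
        List.map_map, List.foldl_map]
    rfl
  simp only [h2]
  rw [← List.foldl_flatMap]
  exact pvFoldlUSplit _ _ _ _ _

theorem mem_pvOccs (t : Int) (row : List Int) (c : Int) :
    c ∈ pvOccs t row ↔ ∃ (j : Nat) (_ : j < row.length), c = (j : Int) ∧ row[j] = t := by
  simp only [pvOccs, List.mem_filterMap, PySem.List.mem_enumerate_iff,
    Option.ite_none_right_eq_some, Option.some.injEq]
  constructor
  · rintro ⟨a, ⟨k, hk, rfl⟩, hat, hac⟩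
    exact ⟨k, hk, by simpa using hac.symm, by simpa using hat⟩
  · rintro ⟨j, hj, rfl, hrow⟩
    exact ⟨((0 : Int) + j, row[j]), ⟨j, hj, rfl⟩, by simpa using hrow, by simp⟩

theorem mem_pvP (t : Int) (grid : List (List Int)) (r c : Int) :
    (r, c) ∈ pvP t grid
      ↔ ∃ (i : Nat) (hi : i < grid.length), r = (i : Int) ∧ c ∈ pvOccs t grid[i] := by
  simp only [pvP, List.mem_flatMap, PySem.List.mem_enumerate_iff, List.mem_map]
  constructor
  · rintro ⟨p, ⟨i, hi, rfl⟩, c', hc', h⟩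
    injection h with h1 h2
    subst h2
    exact ⟨i, hi, by simpa using h1.symm, hc'⟩
  · rintro ⟨i, hi, rfl, hc⟩
    exact ⟨((0 : Int) + i, grid[i]), ⟨i, hi, rfl⟩, c, hc, by simp⟩

-- ===== B-side characterization: the single pass, flattened =====

-- the grid's cells (r, c, v) in row-major order
def pvCells (grid : List (List Int)) : List (Int × Int × Int) :=
  (PySem.List.enumerate grid 0).flatMap
    (fun p => (PySem.List.enumerate p.2 0).map (fun q => (p.1, q.1, q.2)))

-- one step of B's loop on a single cell
def pvStep (d : PySem.Dict Int (Int × Int × Int × Int × Int)) (x : Int × Int × Int) :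
    PySem.Dict Int (Int × Int × Int × Int × Int) :=
  if x.2.2 ≠ 0 then
    match d.get? x.2.2 with
    | none => d.insert x.2.2 (1, x.1, x.1, x.2.1, x.2.1)
    | some s => d.insert x.2.2 (bUpd s x.1 x.2.1)
  else d

-- the (r, c) occurrences of color v among a cell list
def pvOccsC (v : Int) (L : List (Int × Int × Int)) : List (Int × Int) :=
  L.filterMap (fun x => if x.2.2 = v then some (x.1, x.2.1) else none)

def pvOccStep (o : Option (Int × Int × Int × Int × Int)) (rc : Int × Int) :
    Option (Int × Int × Int × Int × Int) :=
  some (match o with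
        | none => (1, rc.1, rc.1, rc.2, rc.2)
        | some s => bUpd s rc.1 rc.2)

theorem bStats_eq_cells (grid : List (List Int)) :
    bStats grid = (pvCells grid).foldl pvStep PySem.Dict.empty := by
  unfold bStats pvCells
  rw [List.foldl_flatMap]
  congr 1
  funext d p
  rw [List.foldl_map]
  rfl

theorem pvStep_get (v : Int) (hv : v ≠ 0) :
    ∀ (L : List (Int × Int × Int)) (d : PySem.Dict Int (Int × Int × Int × Int × Int)),
      (L.foldl pvStep d).get? v = (pvOccsC v L).foldl pvOccStep (d.get? v) := by
  intro L
  induction L with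
  | nil => intro d; rfl
  | cons x xs ih =>
    intro d
    rw [List.foldl_cons, ih (pvStep d x)]
    by_cases hx0 : x.2.2 = 0
    · have hxv : ¬ x.2.2 = v := by omega
      have hstep : pvStep d x = d := by
        unfold pvStep; rw [if_neg (not_not_intro hx0)]
      have hocc : pvOccsC v (x :: xs) = pvOccsC v xs := by simp [pvOccsC, hxv]
      rw [hstep, hocc]
    · by_cases hxv : x.2.2 = v
      · have hstep : (pvStep d x).get? v = pvOccStep (d.get? v) (x.1, x.2.1) := by
          unfold pvStep pvOccStep
          rw [if_pos hx0, hxv]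
          cases hg : d.get? v <;> simp [PySem.Dict.get?_insert_self]
        have hocc : pvOccsC v (x :: xs) = (x.1, x.2.1) :: pvOccsC v xs := by
          simp [pvOccsC, hxv]
        rw [hocc, List.foldl_cons, hstep]
      · have hstep : (pvStep d x).get? v = d.get? v := by
          unfold pvStep
          rw [if_pos hx0]
          cases hg : d.get? x.2.2 <;>
            simp [PySem.Dict.get?_insert, Ne.symm hxv]
        have hocc : pvOccsC v (x :: xs) = pvOccsC v xs := by
          simp [pvOccsC, hxv]
        rw [hocc, hstep]

theorem pvStep_get_zero :
    ∀ (L : List (Int × Int × Int)) (d : PySem.Dict Int (Int × Int × Int × Int × Int)),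
      d.get? 0 = none → (L.foldl pvStep d).get? 0 = none := by
  intro L
  induction L with
  | nil => intro d h; exact h
  | cons x xs ih =>
    intro d h
    refine ih (pvStep d x) ?_
    unfold pvStep
    by_cases hx0 : x.2.2 ≠ 0
    · rw [if_pos hx0]
      cases hg : d.get? x.2.2 <;>
        simp [PySem.Dict.get?_insert, Ne.symm hx0, h]
    · rw [if_neg hx0]; exact h

theorem pvStep_nodup :
    ∀ (L : List (Int × Int × Int)) (d : PySem.Dict Int (Int × Int × Int × Int × Int)),
      d.keys.Nodup → (L.foldl pvStep d).keys.Nodup := by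
  intro L
  induction L with
  | nil => intro d h; exact h
  | cons x xs ih =>
    intro d h
    refine ih (pvStep d x) ?_
    unfold pvStep
    split
    · cases d.get? x.2.2 <;> exact PySem.Dict.nodup_keys_insert _ _ _ h
    · exact h

-- splitting the per-color aggregate fold into its five components
theorem pvOccFoldSplit :
    ∀ (P : List (Int × Int)) (s : Int × Int × Int × Int × Int),
      P.foldl pvOccStep (some s)
        = some (s.1 + P.length,
            (P.map (·.1)).foldl min s.2.1, (P.map (·.1)).foldl max s.2.2.1,
            (P.map (·.2)).foldl min s.2.2.2.1, (P.map (·.2)).foldl max s.2.2.2.2) := by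
  intro P
  induction P with
  | nil => intro s; simp
  | cons rc P ih =>
    intro s
    simp only [List.foldl_cons, List.map_cons, List.length_cons]
    rw [show pvOccStep (some s) rc = some (bUpd s rc.1 rc.2) from rfl, ih]
    refine congrArg some (Prod.ext ?_ rfl)
    show (bUpd s rc.1 rc.2).1 + (P.length : Int) = s.1 + ((P.length + 1 : Nat) : Int)
    simp only [bUpd]
    push_cast
    ring

-- the flattened occurrences are exactly pvP
theorem pvOccsC_cells (v : Int) (grid : List (List Int)) :
    pvOccsC v (pvCells grid) = pvP v grid := by
  unfold pvOccsC pvCells pvP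
  rw [List.filterMap_flatMap]
  congr 1
  funext p
  rw [List.filterMap_map, pvOccs,
    pvFilterMapIf (fun q : Int × Int => q.2 = v) (fun q : Int × Int => q.1)]
  rw [show ((fun x : Int × Int × Int => if x.2.2 = v then some (x.1, x.2.1) else none) ∘
        fun q : Int × Int => (p.1, q.1, q.2))
      = fun q : Int × Int => if q.2 = v then some ((p.1, q.1) : Int × Int) else none from rfl]
  rw [pvFilterMapIf (fun q : Int × Int => q.2 = v) (fun q : Int × Int => ((p.1, q.1) : Int × Int)),
    List.map_map]
  rfl

-- count agreement and key-set lemmas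
theorem pvFlatMapEnumerate {β : Type} (h : List Int → List β) :
    ∀ (xs : List (List Int)) (s : Int),
      (PySem.List.enumerate xs s).flatMap (fun p => h p.2) = xs.flatMap h := by
  intro xs
  induction xs with
  | nil => intro s; rfl
  | cons x xs ih => intro s; simp [PySem.List.enumerate_cons, ih]

theorem pvCellsVals (grid : List (List Int)) :
    (pvCells grid).map (·.2.2) = grid.flatten := by
  unfold pvCells
  rw [List.map_flatMap]
  have h : ∀ p : Int × List Int,
      ((PySem.List.enumerate p.2 0).map (fun q => (p.1, q.1, q.2))).map (·.2.2) = p.2 := by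
    intro p
    rw [List.map_map]
    exact PySem.List.map_snd_enumerate p.2 0
  simp only [h]
  rw [pvFlatMapEnumerate (fun row => row) grid 0]
  simp [List.flatMap_def]

theorem bVals_eq_filter_flatten (grid : List (List Int)) :
    bVals grid = grid.flatten.filter (fun v => decide (v ≠ 0)) := by
  unfold bVals
  rw [List.flatMap_def, ← List.filter_flatten]

-- the aggregate's occurrence list has exactly the Counter count many elements
theorem pvOccsC_length (v : Int) (hv : v ≠ 0) (grid : List (List Int)) :
    ((pvOccsC v (pvCells grid)).length : Int) = (bVals grid).count v := by
  have h1 : (pvOccsC v (pvCells grid)).length = (pvCells grid).countP (fun x => x.2.2 == v) := by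
    unfold pvOccsC
    rw [List.length_filterMap_eq_countP]
    congr 1
    funext x
    by_cases h : x.2.2 = v <;> simp [h]
  have h2 : (pvCells grid).countP (fun x => x.2.2 == v) = grid.flatten.count v := by
    rw [List.count_eq_countP, ← pvCellsVals, List.countP_map]
    congr 1
  have h3 : (bVals grid).count v = grid.flatten.count v := by
    rw [bVals_eq_filter_flatten]
    exact List.count_filter (by simpa using hv)
  rw [h1, h2, h3]

-- keys of the stats dict: exactly the distinct nonzero values
theorem mem_keys_bStats (grid : List (List Int)) (v : Int) :
    v ∈ (bStats grid).keys ↔ v ∈ bVals grid := by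
  by_cases hv : v = 0
  · subst hv
    constructor
    · intro h
      exfalso
      have h0 : (bStats grid).get? 0 = none := by
        rw [bStats_eq_cells]
        exact pvStep_get_zero _ _ (PySem.Dict.get?_empty 0)
      exact ((PySem.Dict.get?_eq_none_iff_not_mem_keys _ _).1 h0) h
    · intro h
      exfalso
      rcases List.mem_flatMap.1 h with ⟨row, _, hm⟩
      have := List.of_mem_filter hm
      simp at this
  · have hg : (bStats grid).get? v = (pvOccsC v (pvCells grid)).foldl pvOccStep none := by
      rw [bStats_eq_cells, pvStep_get v hv, PySem.Dict.get?_empty]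
    constructor
    · intro hk
      have hne : (bStats grid).get? v ≠ none := by
        intro h
        exact ((PySem.Dict.get?_eq_none_iff_not_mem_keys _ _).1 h) hk
      have hocc : pvOccsC v (pvCells grid) ≠ [] := by
        intro he
        rw [hg, he] at hne
        exact hne rfl
      have hl := pvOccsC_length v hv grid
      have hlen : (pvOccsC v (pvCells grid)).length ≠ 0 := by
        simpa [List.length_eq_zero_iff] using hocc
      exact List.count_pos_iff.1 (by omega)
    · intro hb
      have hcnt : 0 < (bVals grid).count v := List.count_pos_iff.2 hb
      have hocc : pvOccsC v (pvCells grid) ≠ [] := by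
        intro he
        have hl := pvOccsC_length v hv grid
        rw [he] at hl
        simp at hl
        omega
      obtain ⟨rc, P, hP⟩ := List.exists_cons_of_ne_nil hocc
      have hne : (bStats grid).get? v ≠ none := by
        rw [hg, hP, List.foldl_cons,
          show pvOccStep none rc = some ((1 : Int), rc.1, rc.1, rc.2, rc.2) from rfl,
          pvOccFoldSplit]
        simp
      by_contra hk
      exact hne ((PySem.Dict.get?_eq_none_iff_not_mem_keys _ _).2 hk)

-- the stats entry of a color that occurs
theorem bStats_get (grid : List (List Int)) (t : Int) (ht0 : t ≠ 0)
    (rc : Int × Int) (rest : List (Int × Int)) (hP : pvP t grid = rc :: rest) :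
    (bStats grid).get? t
      = some (1 + (rest.length : Int),
          (rest.map (·.1)).foldl min rc.1, (rest.map (·.1)).foldl max rc.1,
          (rest.map (·.2)).foldl min rc.2, (rest.map (·.2)).foldl max rc.2) := by
  rw [bStats_eq_cells, pvStep_get t ht0, PySem.Dict.get?_empty, pvOccsC_cells, hP,
    List.foldl_cons,
    show pvOccStep none rc = some ((1 : Int), rc.1, rc.1, rc.2, rc.2) from rfl,
    pvOccFoldSplit]

-- the aggregate count is the Counter count
theorem bStats_count (grid : List (List Int)) (v : Int) (hvmem : v ∈ bVals grid) :
    ((bStats grid).getD v (0, 0, 0, 0, 0)).1 = ((bVals grid).count v : Int) := by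
  have hv0 : v ≠ 0 := by
    rcases List.mem_flatMap.1 hvmem with ⟨row, _, hm⟩
    have := List.of_mem_filter hm
    simpa using this
  have hocc : pvOccsC v (pvCells grid) ≠ [] := by
    intro he
    have hl := pvOccsC_length v hv0 grid
    rw [he] at hl
    simp at hl
    have := List.count_pos_iff.2 hvmem
    omega
  obtain ⟨rc, rest, hP⟩ := List.exists_cons_of_ne_nil hocc
  have hP' : pvP v grid = rc :: rest := by rw [← pvOccsC_cells, hP]
  have hl := pvOccsC_length v hv0 grid
  rw [hP] at hl
  rw [PySem.Dict.getD_eq_get?_getD, bStats_get grid v hv0 rc rest hP']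
  simp only [Option.getD_some]
  show 1 + (rest.length : Int) = _
  simp only [List.length_cons] at hl
  omega

-- keys of the stats dict stay unique
theorem nodup_keys_bStats (grid : List (List Int)) : (bStats grid).keys.Nodup := by
  rw [bStats_eq_cells]
  exact pvStep_nodup _ _ (PySem.Dict.nodup_keys_empty)

-- ===== remaining running min/max machinery =====
theorem pvFoldlMin (l : List Int) (a : Int) (hne : l ≠ []) (hlt : ∀ x ∈ l, x < a) :
    l.foldl min a ∈ l ∧ ∀ y ∈ l, l.foldl min a ≤ y := by
  obtain ⟨x, xs, rfl⟩ := List.exists_cons_of_ne_nil hne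
  have h1 : List.foldl min a (x :: xs) = min a (xs.foldl min x) := by
    rw [List.foldl_cons, List.foldl_assoc]
  have h2 : PySem.List.min? (x :: xs) (fun y => y) = some (xs.foldl min x) :=
    PySem.List.min?_id_cons x xs
  have hmem : xs.foldl min x ∈ x :: xs := PySem.List.min?_mem h2
  have hmin : ∀ y ∈ x :: xs, xs.foldl min x ≤ y := PySem.List.min?_isMin h2
  have hlt' : xs.foldl min x < a := hlt _ hmem
  have h3 : min a (xs.foldl min x) = xs.foldl min x := min_eq_right (le_of_lt hlt')
  rw [h1, h3]
  exact ⟨hmem, hmin⟩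

theorem pvFoldlMax (l : List Int) (a : Int) (hne : l ≠ []) (hlt : ∀ x ∈ l, a < x) :
    l.foldl max a ∈ l ∧ ∀ y ∈ l, y ≤ l.foldl max a := by
  obtain ⟨x, xs, rfl⟩ := List.exists_cons_of_ne_nil hne
  have h1 : List.foldl max a (x :: xs) = max a (xs.foldl max x) := by
    rw [List.foldl_cons, List.foldl_assoc]
  have h2 : PySem.List.max? (x :: xs) (fun y => y) = some (xs.foldl max x) :=
    PySem.List.max?_id_cons x xs
  have hmem : xs.foldl max x ∈ x :: xs := PySem.List.max?_mem h2
  have hmax : ∀ y ∈ x :: xs, y ≤ xs.foldl max x := PySem.List.max?_isMax h2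
  have hlt' : a < xs.foldl max x := hlt _ hmem
  have h3 : max a (xs.foldl max x) = xs.foldl max x := max_eq_right (le_of_lt hlt')
  rw [h1, h3]
  exact ⟨hmem, hmax⟩

theorem pvMinEq (l : List Int) (x : Int) (xs : List Int) (hcons : l = x :: xs) (a : Int)
    (hlt : ∀ y ∈ l, y < a) : l.foldl min a = xs.foldl min x := by
  have h := pvFoldlMin l a (by rw [hcons]; simp) hlt
  have h2 : PySem.List.min? l (fun y => y) = some (xs.foldl min x) := by
    rw [hcons]; exact PySem.List.min?_id_cons x xs
  exact le_antisymm (h.2 _ (PySem.List.min?_mem h2)) (PySem.List.min?_isMin h2 _ h.1)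

theorem pvMaxEq (l : List Int) (x : Int) (xs : List Int) (hcons : l = x :: xs) (a : Int)
    (hlt : ∀ y ∈ l, a < y) : l.foldl max a = xs.foldl max x := by
  have h := pvFoldlMax l a (by rw [hcons]; simp) hlt
  have h2 : PySem.List.max? l (fun y => y) = some (xs.foldl max x) := by
    rw [hcons]; exact PySem.List.max?_id_cons x xs
  exact le_antisymm (PySem.List.max?_isMax h2 _ h.1) (h.2 _ (PySem.List.max?_mem h2))

-- the output loop: indexing over range(a, b) is the slice grid[a:b]
theorem pvMapRangeGetD (grid : List (List Int)) :
    ∀ (n : Nat) (a b : Int), 0 ≤ a → 0 ≤ b → b ≤ (grid.length : Int) → n = (b - a).toNat →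
      (PySem.List.pyRange a b).map (fun r => PySem.List.pyGetD grid r [])
        = PySem.List.slice grid (some a) (some b) := by
  intro n
  induction n with
  | zero =>
    intro a b h0a h0b hbl hn
    have hba : b ≤ a := by omega
    have h1 : PySem.List.pyRange a b = [] := by
      simp [PySem.List.pyRange, show ¬ a < b by omega]
    rw [h1, PySem.List.slice_toNat grid h0a h0b,
      show b.toNat - a.toNat = 0 by omega, List.take_zero, List.map_nil]
  | succ n ih =>
    intro a b h0a h0b hbl hn
    have hab : a < b := by omega
    have ha' : a.toNat < grid.length := by omega
    rw [PySem.List.pyRange_one_cons hab, List.map_cons,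
      ih (a + 1) b (by omega) h0b hbl (by omega),
      PySem.List.slice_toNat grid h0a h0b,
      PySem.List.slice_toNat grid (by omega : (0:Int) ≤ a + 1) h0b,
      List.drop_eq_getElem_cons ha',
      show b.toNat - a.toNat = (b.toNat - (a + 1).toNat) + 1 by omega,
      List.take_succ_cons,
      show (a + 1).toNat = a.toNat + 1 by omega]
    congr 1
    have hcast : PySem.List.pyGetD grid a [] = PySem.List.pyGetD grid ((a.toNat : Nat) : Int) [] := by
      congr 1; omega
    rw [hcast, PySem.List.pyGetD_natCast]
    exact List.getD_eq_getElem grid [] ha'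

theorem pvW0_eq (g : List Int) (gs : List (List Int)) :
    PySem.List.len (PySem.List.pyGetD (g :: gs) 0 []) = ((((g :: gs).headD []).length : Nat) : Int) := by
  have h : PySem.List.pyGetD (g :: gs) 0 [] = g := by
    rw [show (0 : Int) = ((0 : Nat) : Int) from rfl, PySem.List.pyGetD_natCast]; rfl
  rw [h]; rfl

-- the whole tail after picking the target color agrees, as long as the target occurs
theorem tail_eq (grid : List (List Int)) (t : Int) (hpre : Pre_transform grid) (ht0 : t ≠ 0)
    (hocc : ∃ (i : Nat) (hi : i < grid.length), t ∈ grid[i]) :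
    aTail grid t
      = (PySem.List.slice grid (some ((bStats grid).getD t (0,0,0,0,0)).2.1)
            (some (((bStats grid).getD t (0,0,0,0,0)).2.2.1 + 1))).map
          (fun row => PySem.List.slice row (some ((bStats grid).getD t (0,0,0,0,0)).2.2.2.1)
            (some (((bStats grid).getD t (0,0,0,0,0)).2.2.2.2 + 1))) := by
  obtain ⟨i, hi, hmem⟩ := hocc
  obtain ⟨j, hj, hjt⟩ := List.mem_iff_getElem.1 hmem
  have hPmem : ((i : Int), (j : Int)) ∈ pvP t grid :=
    (mem_pvP t grid _ _).2 ⟨i, hi, rfl, (mem_pvOccs t grid[i] _).2 ⟨j, hj, rfl, hjt⟩⟩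
  have hPne : pvP t grid ≠ [] := List.ne_nil_of_mem hPmem
  obtain ⟨rc, rest, hP⟩ := List.exists_cons_of_ne_nil hPne
  -- bounds on the coordinates
  have hRb : ∀ r ∈ (pvP t grid).map (·.1), 0 ≤ r ∧ r < (grid.length : Int) := by
    intro r hr
    rw [List.mem_map] at hr
    obtain ⟨⟨r', c⟩, hp, rfl⟩ := hr
    obtain ⟨i', hi', hr', _⟩ := (mem_pvP t grid _ _).1 hp
    show 0 ≤ r' ∧ r' < (grid.length : Int)
    rw [hr']
    constructor
    · positivity
    · exact_mod_cast hi'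
  have hCb : ∀ c ∈ (pvP t grid).map (·.2), 0 ≤ c ∧ c < ((grid.headD []).length : Int) := by
    intro c hc
    rw [List.mem_map] at hc
    obtain ⟨⟨r', c'⟩, hp, rfl⟩ := hc
    obtain ⟨i', hi', _, hc'⟩ := (mem_pvP t grid _ _).1 hp
    obtain ⟨j', hj', hcj, _⟩ := (mem_pvOccs t grid[i'] _).1 hc'
    have hrowlen : (grid[i']'hi').length ≤ (grid.headD []).length :=
      hpre grid[i'] (List.getElem_mem hi')
    show 0 ≤ c' ∧ c' < ((grid.headD []).length : Int)
    rw [hcj]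
    constructor
    · positivity
    · exact_mod_cast lt_of_lt_of_le hj' hrowlen
  -- grid is nonempty, so the c_min initializer is the first row's length
  obtain ⟨g, gs, hg⟩ := List.exists_cons_of_ne_nil
    (show grid ≠ [] by intro h; rw [h] at hi; exact absurd hi (by simp))
  have hW0 : PySem.List.len (PySem.List.pyGetD grid 0 []) = ((grid.headD []).length : Int) := by
    rw [hg]; exact pvW0_eq g gs
  have hconsR : (pvP t grid).map (·.1) = rc.1 :: rest.map (·.1) := by rw [hP]; rfl
  have hconsC : (pvP t grid).map (·.2) = rc.2 :: rest.map (·.2) := by rw [hP]; rfl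
  -- the four extremes of A's running loop are B's aggregate components
  have hR0 : ((pvP t grid).map (·.1)).foldl min (PySem.List.len grid)
      = (rest.map (·.1)).foldl min rc.1 :=
    pvMinEq _ _ _ hconsR _ (fun y hy => (hRb y hy).2)
  have hR1 : ((pvP t grid).map (·.1)).foldl max (-1) = (rest.map (·.1)).foldl max rc.1 :=
    pvMaxEq _ _ _ hconsR _ (fun y hy => by have := (hRb y hy).1; omega)
  have hC0 : ((pvP t grid).map (·.2)).foldl min (PySem.List.len (PySem.List.pyGetD grid 0 []))
      = (rest.map (·.2)).foldl min rc.2 := by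
    rw [hW0]
    exact pvMinEq _ _ _ hconsC _ (fun y hy => (hCb y hy).2)
  have hC1 : ((pvP t grid).map (·.2)).foldl max (-1) = (rest.map (·.2)).foldl max rc.2 :=
    pvMaxEq _ _ _ hconsC _ (fun y hy => by have := (hCb y hy).1; omega)
  -- name the bounds
  set R0 := (rest.map (·.1)).foldl min rc.1 with hR0d
  set R1 := (rest.map (·.1)).foldl max rc.1 with hR1d
  set C0 := (rest.map (·.2)).foldl min rc.2 with hC0d
  set C1 := (rest.map (·.2)).foldl max rc.2 with hC1d
  have hD : (bStats grid).getD t (0, 0, 0, 0, 0) = (1 + (rest.length : Int), R0, R1, C0, C1) := by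
    rw [PySem.Dict.getD_eq_get?_getD, bStats_get grid t ht0 rc rest hP]
    rfl
  -- bounds for the row slice
  have hR0mem : R0 ∈ (pvP t grid).map (·.1) := by
    rw [← hR0]
    exact (pvFoldlMin _ _ (by rw [hconsR]; simp) (fun y hy => (hRb y hy).2)).1
  have hR1mem : R1 ∈ (pvP t grid).map (·.1) := by
    rw [← hR1]
    exact (pvFoldlMax _ _ (by rw [hconsR]; simp)
      (fun y hy => by have := (hRb y hy).1; omega)).1
  have hR0b := hRb _ hR0mem
  have hR1b := hRb _ hR1mem
  -- assemble
  rw [aTail, aBox_eq]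
  simp only [hR0, hR1, hC0, hC1, hD]
  rw [PySem.List.foldl_append_eq_flatMap
    (fun r => [PySem.List.slice (PySem.List.pyGetD grid r []) (some C0) (some (C1 + 1))])]
  rw [show (List.flatMap
        (fun r => [PySem.List.slice (PySem.List.pyGetD grid r []) (some C0) (some (C1 + 1))])
        (PySem.List.pyRange R0 (R1 + 1)))
      = (PySem.List.pyRange R0 (R1 + 1)).map
          (fun r => PySem.List.slice (PySem.List.pyGetD grid r []) (some C0) (some (C1 + 1))) by
    rw [List.flatMap_def]
    induction (PySem.List.pyRange R0 (R1 + 1)) with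
    | nil => rfl
    | cons x xs ih => simp [ih]]
  have hmm :
      (PySem.List.pyRange R0 (R1 + 1)).map
          (fun r => PySem.List.slice (PySem.List.pyGetD grid r []) (some C0) (some (C1 + 1)))
        = ((PySem.List.pyRange R0 (R1 + 1)).map (fun r => PySem.List.pyGetD grid r [])).map
            (fun row => PySem.List.slice row (some C0) (some (C1 + 1))) := by
    rw [List.map_map]
    rfl
  rw [hmm,
    pvMapRangeGetD grid ((R1 + 1) - R0).toNat R0 (R1 + 1)
      (by omega) (by omega) (by omega) rfl]
  exact List.nil_append _

-- ===== VERDICT (by name: the statement is the Claim_ definition above) =====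
theorem transform_spec : Claim_equal_transform := by
  intro grid _hdom hpre
  unfold Spec_transform
  show transform grid = transform_alt grid
  by_cases hv : bVals grid = []
  · have hkeys : (bStats grid).keys = [] := by
      by_contra hk
      obtain ⟨v, hvmem⟩ := List.exists_mem_of_ne_nil _ hk
      have := (mem_keys_bStats grid v).1 hvmem
      rw [hv] at this
      cases this
    have hstats : (bStats grid).items = [] := by
      have : (bStats grid).items.map (·.1) = [] := hkeys
      exact List.map_eq_nil_iff.1 this
    simp [transform, transform_alt, aCounts_eq, hv, hstats,
      PySem.Dict.counter, PySem.Dict.empty]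
  · obtain ⟨v0, vs0, hvv⟩ := List.exists_cons_of_ne_nil hv
    have hAne : (PySem.Dict.counter (bVals grid)).items ≠ [] := by
      rw [PySem.Dict.items_counter, hvv]
      intro h
      rw [List.map_eq_nil_iff] at h
      have hv2 := (PySem.Set.mem_ofList (v0 :: vs0) v0).2 List.mem_cons_self
      rw [h] at hv2
      cases hv2
    have hv0mem : v0 ∈ (bStats grid).keys :=
      (mem_keys_bStats grid v0).2 (hvv ▸ List.mem_cons_self)
    have hBkeysne : (bStats grid).keys ≠ [] := List.ne_nil_of_mem hv0mem
    have hBne : (bStats grid).items ≠ [] := by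
      intro h
      rw [show (bStats grid).keys = (bStats grid).items.map (·.1) from rfl, h] at hBkeysne
      exact hBkeysne rfl
    have hKne : (PySem.Dict.counter (bVals grid)).keys ≠ [] := by
      rw [PySem.Dict.keys_counter, hvv]
      intro h
      have hv2 := (PySem.Set.mem_ofList (v0 :: vs0) v0).2 List.mem_cons_self
      rw [h] at hv2
      cases hv2
    -- the two selections pick the same color
    set cntA : Int → Int := fun k => (PySem.Dict.counter (bVals grid)).getD k 0 with hcntA
    set cntB : Int → Int := fun k => ((bStats grid).getD k (0, 0, 0, 0, 0)).1 with hcntB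
    have hmemiff : ∀ y, y ∈ (bStats grid).keys ↔ y ∈ (PySem.Dict.counter (bVals grid)).keys := by
      intro y
      rw [mem_keys_bStats, PySem.Dict.keys_counter, PySem.Set.mem_ofList]
    have hcagree : ∀ y ∈ (bStats grid).keys, cntB y = cntA y := by
      intro y hy
      have hybv : y ∈ bVals grid := (mem_keys_bStats grid y).1 hy
      rw [hcntA, hcntB]
      simp only []
      rw [bStats_count grid y hybv, PySem.Dict.getD_counter]
    obtain ⟨xA, tA, hKA⟩ := List.exists_cons_of_ne_nil hKne
    obtain ⟨xB, tB, hKB⟩ := List.exists_cons_of_ne_nil hBkeysne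
    have bA : pvBest cntA (xA :: tA) (tA.foldl (pvGB cntA) xA) :=
      pvBestB cntA tA xA (hKA ▸ PySem.Dict.nodup_keys_counter (bVals grid))
    have bB : pvBest cntB (xB :: tB) (tB.foldl (pvGB cntB) xB) :=
      pvBestB cntB tB xB (hKB ▸ nodup_keys_bStats grid)
    have bB' : pvBest cntA (xA :: tA) (tB.foldl (pvGB cntB) xB) := by
      have h1 : pvBest cntA (xB :: tB) (tB.foldl (pvGB cntB) xB) :=
        pvBest_cnt_congr (hKB ▸ hcagree) bB
      exact pvBest_congr (fun y => by rw [← hKA, ← hKB]; exact hmemiff y) h1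
    have hsame :
        PySem.List.min2? (PySem.Dict.counter (bVals grid)).keys
            (fun k => -(cntA k)) (fun k => k)
          = PySem.List.min2? (bStats grid).keys (fun k => -(cntB k)) (fun k => k) := by
      rw [hKA, hKB, min2?_cons_fold cntA, min2?_cons_fold cntB]
      exact congrArg some (pvBest_unique bA bB')
    -- assemble
    rw [transform, transform_alt, aCounts_eq, if_neg hAne, if_neg hBne,
      target_eq (bVals grid) hv]
    rw [show (fun k => -((PySem.Dict.counter (bVals grid)).getD k 0)) = fun k => -(cntA k) from rfl,
      hsame]
    rcases htar : PySem.List.min2? (bStats grid).keys (fun k => -(cntB k)) (fun k => k)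
      with _ | t
    · rfl
    · -- the chosen target is a key, hence a nonzero value occurring in the grid
      have htmem : t ∈ (bStats grid).keys := by
        have hfold := min2?_cons_fold cntB xB tB
        rw [hKB, hfold] at htar
        rw [hKB]
        rw [← Option.some_inj.1 htar]
        exact (pvBestB cntB tB xB (hKB ▸ nodup_keys_bStats grid)).1
      have htbv : t ∈ bVals grid := (mem_keys_bStats grid t).1 htmem
      have ht0 : t ≠ 0 := by
        rcases List.mem_flatMap.1 htbv with ⟨row, _, hm⟩
        have := List.of_mem_filter hm
        simpa using this
      have hocc : ∃ (i : Nat) (hi : i < grid.length), t ∈ grid[i] := by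
        rcases List.mem_flatMap.1 htbv with ⟨row, hrow, hm⟩
        obtain ⟨i, hi, rfl⟩ := List.mem_iff_getElem.1 hrow
        exact ⟨i, hi, List.mem_of_mem_filter hm⟩
      exact tail_eq grid t hpre ht0 hocc
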